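-- pv_equiv track=rewrite | github.com/marcoscfreitas/furg-1ano | algoritmos e estruturas de dados 1/prova2bim_aed1_beecrowd/prova1.py | escolherLinguagem
-- ===== SOURCE A (Python) =====
-- def escolherLinguagem (linguagens) :
--     linguagem = linguagens[0]
--     cont2 = 1
--     while cont2 < len(linguagens) :
--         if linguagens[cont2] != linguagem :
--             linguagem = 'ingles'
--             return linguagem
--         cont2+=1
--     return linguagem
-- ===== SOURCE B (Python) =====
-- def escolherLinguagem(linguagens):
--     primeira = linguagens[0]
--     return primeira if len(set(linguagens)) == 1 else 'ingles'
-- ===== Notes on version B (the rewrite author's own statement) =====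
-- stated objective: idiomatic
-- what changed: Replaces the index-based while loop that scans for the first mismatch by building the set of distinct values once and testing whether it has exactly one element.
import Mathlib
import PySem

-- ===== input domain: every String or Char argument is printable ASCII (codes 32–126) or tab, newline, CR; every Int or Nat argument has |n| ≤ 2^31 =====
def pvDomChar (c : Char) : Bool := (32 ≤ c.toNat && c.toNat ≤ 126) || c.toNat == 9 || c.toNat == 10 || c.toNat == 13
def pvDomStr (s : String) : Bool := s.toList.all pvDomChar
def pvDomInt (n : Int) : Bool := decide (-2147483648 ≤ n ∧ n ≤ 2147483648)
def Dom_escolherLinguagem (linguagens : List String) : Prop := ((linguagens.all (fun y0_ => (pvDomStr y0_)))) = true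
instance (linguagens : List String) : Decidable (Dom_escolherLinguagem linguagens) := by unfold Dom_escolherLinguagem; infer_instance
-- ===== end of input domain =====

-- B replaces A's index-scanning while loop by one set-cardinality test (objective: idiomatic).

-- ===== PORT A =====
-- the 'while cont2 < len(linguagens)' loop, state = (linguagem, cont2); the early
-- 'return "ingles"' is the first branch
def escolherLinguagemLoop (linguagens : List String) (linguagem : String) (cont2 : Nat) : String :=
  if h : cont2 < linguagens.length then
    if linguagens[cont2] ≠ linguagem then "ingles"
    else escolherLinguagemLoop linguagens linguagem (cont2 + 1)
  else linguagem
termination_by linguagens.length - cont2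

-- 'linguagens[0]' raises IndexError on []; Pre_ excludes that input, the getD default is never read
def escolherLinguagem (linguagens : List String) : String :=
  let linguagem := (PySem.List.pyGet? linguagens 0).getD ""
  escolherLinguagemLoop linguagens linguagem 1

-- ===== PORT B =====
-- 'linguagens[0]' raises IndexError on []; Pre_ excludes that input
def escolherLinguagem_alt (linguagens : List String) : String :=
  let primeira := (PySem.List.pyGet? linguagens 0).getD ""
  if PySem.Set.len (PySem.Set.ofList linguagens) == 1 then primeira else "ingles"

-- ===== PRECONDITION & SPEC =====
-- Pre_ excludes exactly the empty list, on which A (linguagens[0]) raises IndexError.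
def Pre_escolherLinguagem (linguagens : List String) : Prop := linguagens ≠ []
instance (linguagens : List String) : Decidable (Pre_escolherLinguagem linguagens) := by unfold Pre_escolherLinguagem; infer_instance
def pvWitness_escolherLinguagem : List String := ["python", "python"]

def Spec_escolherLinguagem (linguagens : List String) (out : String) : Prop := out = escolherLinguagem_alt linguagens
instance (linguagens : List String) (out : String) : Decidable (Spec_escolherLinguagem linguagens out) := by unfold Spec_escolherLinguagem; infer_instance

-- ===== CLAIM (what is proved, stated in full; the proofs are below) =====
def Claim_equal_escolherLinguagem : Prop := ∀ (linguagens : List String), Dom_escolherLinguagem linguagens → Pre_escolherLinguagem linguagens → Spec_escolherLinguagem linguagens (escolherLinguagem linguagens)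

-- ===== LEMMAS AND PROOFS =====

-- A's loop decides whether everything from index cont2 on equals linguagem
theorem escolherLinguagemLoop_eq (linguagens : List String) (x : String) (c : Nat) :
    escolherLinguagemLoop linguagens x c =
      if (linguagens.drop c).all (· == x) then x else "ingles" := by
  rw [escolherLinguagemLoop]
  by_cases h : c < linguagens.length
  · rw [List.drop_eq_getElem_cons h]
    by_cases hx : linguagens[c] = x
    · simp [h, hx, escolherLinguagemLoop_eq linguagens x (c + 1)]
    · have hfalse : ¬ (linguagens.drop c).all (· == x) = true := by
        simp only [List.all_eq_true, beq_iff_eq]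
        intro hc
        exact hx (hc _ (by rw [List.drop_eq_getElem_cons h]; exact List.mem_cons_self ..))
      simp [h, hx, hfalse]
  · have : linguagens.drop c = [] := List.drop_eq_nil_of_le (by omega)
    simp [h, this]
termination_by linguagens.length - c

-- B's set has one element iff every element equals the head
theorem setLen_one_iff (x : String) (xs : List String) :
    (PySem.Set.ofList (x :: xs)).length = 1 ↔ ∀ y ∈ xs, y = x := by
  constructor
  · intro h1 y hy
    obtain ⟨z, hz⟩ : ∃ z, PySem.Set.ofList (x :: xs) = [z] := by
      cases hs : PySem.Set.ofList (x :: xs) with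
      | nil => simp [hs] at h1
      | cons a t =>
        cases t with
        | nil => exact ⟨a, rfl⟩
        | cons b u => simp [hs] at h1
    have hx : x ∈ PySem.Set.ofList (x :: xs) := by
      rw [PySem.Set.mem_ofList]; simp
    have hy' : y ∈ PySem.Set.ofList (x :: xs) := by
      rw [PySem.Set.mem_ofList]; simp [hy]
    rw [hz] at hx hy'
    simp at hx hy'
    exact hy'.trans hx.symm
  · intro hall
    have hsub : PySem.Set.ofList (x :: xs) ⊆ [x] := by
      intro y hy
      rw [PySem.Set.mem_ofList] at hy
      rcases List.mem_cons.1 hy with h | h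
      · simp [h]
      · simp [hall y h]
    have hx : x ∈ PySem.Set.ofList (x :: xs) := by
      rw [PySem.Set.mem_ofList]; simp
    have hnd := PySem.Set.nodup_ofList (x :: xs)
    cases hs : PySem.Set.ofList (x :: xs) with
    | nil => rw [hs] at hx; simp at hx
    | cons a t =>
      rw [hs] at hsub hnd
      have ha : a = x := by have := hsub (List.mem_cons_self ..); simpa using this
      cases t with
      | nil => rfl
      | cons b u =>
        have hb : b = x := by
          have := hsub (by simp : b ∈ a :: b :: u); simpa using this
        subst ha hb
        simp at hnd

-- ===== VERDICT (by name: the statement is the Claim_ definition above) =====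
theorem escolherLinguagem_spec : Claim_equal_escolherLinguagem := by
  intro linguagens _ hpre
  cases linguagens with
  | nil => exact absurd rfl hpre
  | cons x xs =>
    unfold Spec_escolherLinguagem escolherLinguagem escolherLinguagem_alt
    rw [escolherLinguagemLoop_eq]
    simp only [PySem.List.pyGet?, PySem.List.pyIdx?]
    by_cases hall : ∀ y ∈ xs, y = x
    · have h1 : (PySem.Set.ofList (x :: xs)).length = 1 := (setLen_one_iff x xs).2 hall
      simp [h1]
      intro y hy hne
      exact absurd (hall y hy) hne
    · have h1 : (PySem.Set.ofList (x :: xs)).length ≠ 1 :=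
        fun h => hall ((setLen_one_iff x xs).1 h)
      simp [h1, hall]
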